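-- pv_equiv track=rewrite | github.com/wlgud0402/dailyalgo | programmers/가장큰수.py | solution
-- ===== SOURCE A (Python) =====
-- def solution(numbers):
--     bundle = [(i, int(str(num)[:1])) for i, num in enumerate(numbers)]
--     bundle.sort(key=lambda ele: ele[1])
--     answer = ''
--     for i in range(len(bundle)-1, -1, -1):
--         num_index = bundle[i][0]
--         answer += str(numbers[num_index])
--     return answer
-- ===== SOURCE B (Python) =====
-- def solution(numbers):
--     buckets = [[] for _ in range(10)]
--     for num in numbers:
--         buckets[int(str(num)[:1])].append(num)
--     out = []
--     for d in range(9, -1, -1):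
--         for num in reversed(buckets[d]):
--             out.append(str(num))
--     return ''.join(out)
-- ===== Notes on version B (the rewrite author's own statement) =====
-- stated objective: faster
-- what changed: A builds (index, first-digit) pairs, comparison-sorts them by the digit and walks the sorted list backwards with repeated string concatenation; B bucket-sorts the numbers into 10 first-digit buckets in one pass and emits buckets 9..0, each reversed, joining at the end.
import Mathlib
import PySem

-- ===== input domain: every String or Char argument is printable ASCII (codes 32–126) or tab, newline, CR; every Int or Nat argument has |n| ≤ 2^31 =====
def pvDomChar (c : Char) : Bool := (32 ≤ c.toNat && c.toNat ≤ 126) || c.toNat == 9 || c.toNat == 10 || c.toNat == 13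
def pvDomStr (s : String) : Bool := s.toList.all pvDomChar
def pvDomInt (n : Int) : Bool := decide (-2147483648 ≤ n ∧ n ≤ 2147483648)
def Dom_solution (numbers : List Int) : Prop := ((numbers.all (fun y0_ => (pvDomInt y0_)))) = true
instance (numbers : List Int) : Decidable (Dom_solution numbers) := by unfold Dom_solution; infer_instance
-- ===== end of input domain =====

-- B replaces A's comparison sort over (index, first-digit) pairs by a bucket sort on the ten
-- possible first-digit keys, built in one pass and emitted 9→0 with each bucket reversed.

-- int(str(num)[:1]) — the first-digit key both Pythons compute identically
def firstKey (n : Int) : Int := (PySem.Int.ofChars? ((PySem.Int.toChars n).take 1)).getD 0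

-- ===== PORT A =====
def solution (numbers : List Int) : String :=
  let bundle := (PySem.List.enumerate numbers 0).map (fun p => (p.1, firstKey p.2))
  let bundle2 := PySem.List.sorted bundle (fun e => e.2) false
  let answer := (PySem.List.pyRange (PySem.List.len bundle2 - 1) (-1) (-1)).foldl
    (fun acc i =>
      let numIndex := (PySem.List.pyGetD bundle2 i ((0 : Int), (0 : Int))).1
      acc ++ PySem.Int.toChars (PySem.List.pyGetD numbers numIndex 0)) []
  String.ofList answer

-- ===== PORT B =====
def solution_alt (numbers : List Int) : String :=
  let buckets := numbers.foldl
    (fun bs num =>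
      let d := firstKey num
      PySem.List.pySetD bs d (PySem.List.pyGetD bs d [] ++ [num]))
    (List.replicate 10 ([] : List Int))
  let out := (PySem.List.pyRange 9 (-1) (-1)).foldl
    (fun acc d =>
      (PySem.List.pyGetD buckets d []).reverse.foldl
        (fun acc2 num => acc2 ++ [PySem.Int.toChars num]) acc)
    ([] : List (List Char))
  String.ofList out.flatten

-- ===== PRECONDITION & SPEC =====
-- Pre_ excludes lists with a negative element: there int(str(num)[:1]) is int('-') and both Pythons raise ValueError.
def Pre_solution (numbers : List Int) : Prop := ∀ n ∈ numbers, 0 ≤ n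
instance (numbers : List Int) : Decidable (Pre_solution numbers) := by unfold Pre_solution; infer_instance
def pvWitness_solution : List Int := [3, 30, 34, 5, 9, 0, 2147483648]

def Spec_solution (numbers : List Int) (out : String) : Prop := out = solution_alt numbers
instance (numbers : List Int) (out : String) : Decidable (Spec_solution numbers out) := by unfold Spec_solution; infer_instance

-- ===== CLAIM (what is proved, stated in full; the proofs are below) =====
def Claim_equal_solution : Prop := ∀ (numbers : List Int), Dom_solution numbers → Pre_solution numbers → Spec_solution numbers (solution numbers)

-- ===== LEMMAS AND PROOFS =====

-- every character str() produces for a natural number is a decimal digit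
lemma toDigitsCore_all_digit (f n : Nat) (acc : List Char)
    (hacc : ∀ c ∈ acc, c ∈ ['0','1','2','3','4','5','6','7','8','9']) :
    ∀ c ∈ Nat.toDigitsCore 10 f n acc, c ∈ ['0','1','2','3','4','5','6','7','8','9'] := by
  induction f generalizing n acc with
  | zero => simpa [Nat.toDigitsCore] using hacc
  | succ f ih =>
    intro c hc
    have hd : Nat.digitChar (n % 10) ∈ ['0','1','2','3','4','5','6','7','8','9'] := by
      have h10 : n % 10 < 10 := Nat.mod_lt _ (by norm_num)
      set k := n % 10 with hk
      interval_cases k <;> decide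
    simp only [Nat.toDigitsCore] at hc
    split at hc
    · rcases List.mem_cons.mp hc with rfl | hc
      · exact hd
      · exact hacc _ hc
    · exact ih (n / 10) _ (by intro z hz; rcases List.mem_cons.mp hz with rfl | hz; exacts [hd, hacc _ hz]) c hc

lemma toDigitsCore_ne_nil (b : Nat) : ∀ (f n : Nat) (acc : List Char), acc ≠ [] →
    Nat.toDigitsCore b f n acc ≠ [] := by
  intro f
  induction f with
  | zero => intro n acc h; simpa [Nat.toDigitsCore] using h
  | succ f ih =>
    intro n acc h
    simp only [Nat.toDigitsCore]
    split
    · simp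
    · exact ih _ _ (by simp)

lemma toDigits_ne_nil (m : Nat) : Nat.toDigits 10 m ≠ [] := by
  unfold Nat.toDigits
  simp only [Nat.toDigitsCore]
  split
  · simp
  · exact toDigitsCore_ne_nil 10 _ _ _ (by simp)

-- a single parsed character is a decimal digit or fails to parse, so the key is always in [0,10)
lemma firstKey_bounds (n : Int) : 0 ≤ firstKey n ∧ firstKey n < 10 := by
  by_cases hneg : n < 0
  · simp only [firstKey, PySem.Int.toChars, if_pos hneg, List.take_succ_cons, List.take_zero]
    decide
  · have hne := toDigits_ne_nil n.toNat
    have hall := toDigitsCore_all_digit (n.toNat + 1) n.toNat [] (by simp)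
    cases h : Nat.toDigits 10 n.toNat with
    | nil => exact absurd h hne
    | cons c rest =>
      have hc : c ∈ ['0','1','2','3','4','5','6','7','8','9'] := by
        apply hall
        rw [show Nat.toDigitsCore 10 (n.toNat + 1) n.toNat [] = Nat.toDigits 10 n.toNat from rfl, h]
        simp
      simp only [firstKey, PySem.Int.toChars, if_neg hneg, h, List.take_succ_cons, List.take_zero]
      fin_cases hc <;> decide

lemma insertBy_append_not_before {α : Type} (before : α → α → Bool) (x : α) (l1 l2 : List α)
    (h : ∀ y ∈ l1, before x y = false) :
    PySem.List.insertBy before x (l1 ++ l2) = l1 ++ PySem.List.insertBy before x l2 := by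
  induction l1 with
  | nil => simp
  | cons y ys ih =>
    simp only [List.cons_append, PySem.List.insertBy, h y (by simp)]
    simp only [Bool.false_eq_true, if_false, List.cons.injEq, true_and]
    exact ih (fun z hz => h z (by simp [hz]))

lemma insertBy_all_before {α : Type} (before : α → α → Bool) (x : α) (l : List α)
    (h : ∀ y ∈ l, before x y = true) :
    PySem.List.insertBy before x l = x :: l := by
  cases l with
  | nil => rfl
  | cons y ys => simp [PySem.List.insertBy, h y (by simp)]

-- inserting an element into a bucket-concatenation appends it to the end of its own bucket
lemma insertBy_flatMap_buckets (x : Int × Int) (ds : List Int) (f : Int → List (Int × Int))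
    (hp : ds.Pairwise (· < ·)) (hx : x.2 ∈ ds)
    (hf : ∀ d ∈ ds, ∀ e ∈ f d, e.2 = d) :
    PySem.List.insertBy (fun a b => decide (a.2 < b.2)) x (ds.flatMap f)
      = ds.flatMap (fun d => f d ++ if x.2 = d then [x] else []) := by
  induction ds with
  | nil => simp at hx
  | cons d rest ih =>
    have hlt : ∀ d' ∈ rest, d < d' := fun d' hd' => (List.pairwise_cons.mp hp).1 d' hd'
    rcases List.mem_cons.mp hx with heq | hmem
    · simp only [List.flatMap_cons]
      rw [insertBy_append_not_before _ _ _ _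
          (fun y hy => by
            have : y.2 = d := hf d (by simp) y hy
            simp [this, heq])]
      rw [insertBy_all_before _ _ _
          (fun y hy => by
            obtain ⟨d', hd', hyf⟩ := List.mem_flatMap.mp hy
            have : y.2 = d' := hf d' (by simp [hd']) y hyf
            simp [this, heq]
            exact hlt d' hd')]
      rw [if_pos heq]
      have : (rest.flatMap fun d' => f d' ++ if x.2 = d' then [x] else []) = rest.flatMap f := by
        apply List.flatMap_congr
        intro d' hd'
        rw [if_neg (by have := hlt d' hd'; omega)]
        simp
      rw [this]
      simp
    · have hdx : d < x.2 := hlt _ hmem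
      simp only [List.flatMap_cons]
      rw [insertBy_append_not_before _ _ _ _
          (fun y hy => by
            have : y.2 = d := hf d (by simp) y hy
            simp [this]; omega)]
      rw [ih (List.pairwise_cons.mp hp).2 hmem (fun d' hd' => hf d' (by simp [hd']))]
      rw [if_neg (by omega)]
      simp

-- PySem's stable sort by a key in [0,10) is the concatenation of the ten key-buckets
lemma sorted_eq_buckets (xs : List (Int × Int)) (h : ∀ e ∈ xs, 0 ≤ e.2 ∧ e.2 < 10) :
    PySem.List.sorted xs (fun e => e.2) false
      = (PySem.List.pyRange 0 10 1).flatMap (fun d => xs.filter (fun e => e.2 == d)) := by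
  rw [PySem.List.sorted_eq_foldl_insertBy]
  induction xs using List.reverseRecOn with
  | nil => simp
  | append_singleton xs x ih =>
    rw [List.foldl_append, List.foldl_cons, List.foldl_nil]
    rw [ih (fun e he => h e (List.mem_append_left _ he))]
    rw [insertBy_flatMap_buckets x (PySem.List.pyRange 0 10 1)
        (fun d => xs.filter (fun e => e.2 == d))
        (PySem.List.pairwise_lt_pyRange_one 0 10)
        (by rw [PySem.List.mem_pyRange_one]
            have := h x (by simp)
            omega)
        (by intro d _ e he
            have := List.of_mem_filter he
            simpa using this)]
    apply List.flatMap_congr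
    intro d _
    rw [List.filter_append]
    by_cases hxd : x.2 = d
    · simp [hxd]
    · simp [hxd]

-- B's bucket array after the building pass
lemma buckets_inv (xs : List Int) :
    xs.foldl (fun bs num =>
        PySem.List.pySetD bs (firstKey num) (PySem.List.pyGetD bs (firstKey num) [] ++ [num]))
      (List.replicate 10 ([] : List Int))
      = (List.range 10).map (fun (d : Nat) => xs.filter (fun n => firstKey n == (d : Int))) := by
  induction xs using List.reverseRecOn with
  | nil => simp [List.replicate, List.range_succ]
  | append_singleton xs x ih =>
    rw [List.foldl_append, List.foldl_cons, List.foldl_nil, ih]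
    have hb := firstKey_bounds x
    have hlen : ((List.range 10).map (fun (d : Nat) => xs.filter (fun n => firstKey n == (d : Int)))).length = 10 := by simp
    have hget : PySem.List.pyGetD ((List.range 10).map (fun (d : Nat) => xs.filter (fun n => firstKey n == (d : Int)))) (firstKey x) []
        = xs.filter (fun n => firstKey n == ((firstKey x).toNat : Int)) := by
      rw [PySem.List.pyGetD_eq_getElem _ _ hb.1 (by rw [hlen]; omega)]
      simp only [List.getElem_map, List.getElem_range]
    rw [hget, PySem.List.pySetD_of_nonneg _ _ hb.1]
    apply List.ext_getElem (by simp)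
    intro j hj hj2
    simp only [List.length_set, hlen] at hj
    rw [List.getElem_set]
    simp only [List.getElem_map, List.getElem_range, List.filter_append]
    by_cases hjk : (firstKey x).toNat = j
    · rw [if_pos hjk]
      have : firstKey x = (j : Int) := by omega
      simp [this]
    · rw [if_neg hjk]
      have : ¬ (firstKey x == (j : Int)) = true := by
        simp only [beq_iff_eq]; omega
      simp [this]

lemma pyGetD_enumerate (numbers : List Int) (p : Int × Int) (hp : p ∈ PySem.List.enumerate numbers 0) :
    PySem.List.pyGetD numbers p.1 0 = p.2 := by
  obtain ⟨k, hk, rfl⟩ := (PySem.List.mem_enumerate_iff _ _ _).mp hp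
  simp [hk]

-- per bucket: A's index lookups give exactly B's bucket contents
lemma bucket_chars (numbers : List Int) (d : Int) :
    (((PySem.List.enumerate numbers 0).map (fun p => (p.1, firstKey p.2))).filter
        (fun e => e.2 == d)).map (fun e => PySem.Int.toChars (PySem.List.pyGetD numbers e.1 0))
      = (numbers.filter (fun n => firstKey n == d)).map PySem.Int.toChars := by
  rw [List.filter_map]
  rw [List.map_map]
  have h1 : (((PySem.List.enumerate numbers 0).filter (fun p => firstKey p.2 == d)).map
      ((fun e => PySem.Int.toChars (PySem.List.pyGetD numbers e.1 0)) ∘ (fun p => (p.1, firstKey p.2))))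
      = ((PySem.List.enumerate numbers 0).filter (fun p => firstKey p.2 == d)).map
        (fun p => PySem.Int.toChars p.2) := by
    apply List.map_congr_left
    intro p hp
    simp only [Function.comp]
    rw [pyGetD_enumerate numbers p (List.mem_of_mem_filter hp)]
  rw [show ((fun (e : Int × Int) => e.2 == d) ∘ (fun (p : Int × Int) => (p.1, firstKey p.2))) = (fun p => firstKey p.2 == d) from rfl]
  rw [h1]
  rw [show (fun (p : Int × Int) => PySem.Int.toChars p.2) = PySem.Int.toChars ∘ (fun (p : Int × Int) => p.2) from rfl]
  rw [← List.map_map]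
  rw [show (fun (p : Int × Int) => firstKey p.2 == d) = ((fun n => firstKey n == d) ∘ (fun (p : Int × Int) => p.2)) from rfl]
  rw [← List.filter_map, PySem.List.map_snd_enumerate]

-- the two ports compute the same character list
theorem solution_eq_alt (numbers : List Int) : solution numbers = solution_alt numbers := by
  unfold solution solution_alt
  simp only [PySem.List.len_eq]
  refine congrArg String.ofList ?_
  set bundle := (PySem.List.enumerate numbers 0).map (fun p => (p.1, firstKey p.2)) with hbund
  set bundle2 := PySem.List.sorted bundle (fun e => e.2) false with hbund2
  have h1 : PySem.List.pyRange ((bundle2.length : Int) - 1) (-1) (-1)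
      = (PySem.List.pyRange 0 (bundle2.length : Int) 1).reverse := by
    rw [PySem.List.pyRange_neg_one_eq_reverse]; norm_num
  rw [h1]
  rw [PySem.List.foldl_append_eq_flatMap
      (g := fun i => PySem.Int.toChars (PySem.List.pyGetD numbers (PySem.List.pyGetD bundle2 i ((0:Int),(0:Int))).1 0))]
  rw [buckets_inv numbers]
  have h2 : PySem.List.pyRange 9 (-1) (-1) = (PySem.List.pyRange 0 10 1).reverse := by
    rw [PySem.List.pyRange_neg_one_eq_reverse]; norm_num
  rw [h2]
  simp only [PySem.List.foldl_append_singleton_eq_map]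
  rw [PySem.List.foldl_append_eq_flatMap
      (g := fun d => ((PySem.List.pyGetD ((List.range 10).map (fun (dd : Nat) => numbers.filter (fun n => firstKey n == (dd : Int)))) d []).reverse).map PySem.Int.toChars)]
  simp only [List.nil_append]
  rw [List.flatMap_def, List.map_reverse]
  have hmap : (PySem.List.pyRange 0 (bundle2.length : Int) 1).map
      (fun i => PySem.Int.toChars (PySem.List.pyGetD numbers (PySem.List.pyGetD bundle2 i ((0:Int),(0:Int))).1 0))
      = bundle2.map (fun e => PySem.Int.toChars (PySem.List.pyGetD numbers e.1 0)) := by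
    rw [show (fun i => PySem.Int.toChars (PySem.List.pyGetD numbers (PySem.List.pyGetD bundle2 i ((0:Int),(0:Int))).1 0))
        = (fun e => PySem.Int.toChars (PySem.List.pyGetD numbers e.1 0)) ∘ (fun i => PySem.List.pyGetD bundle2 i ((0:Int),(0:Int))) from rfl]
    rw [← List.map_map, PySem.List.map_pyGetD_pyRange_zero']
  rw [hmap]
  have hb : bundle2 = (PySem.List.pyRange 0 10 1).flatMap (fun d => bundle.filter (fun e => e.2 == d)) := by
    rw [hbund2]
    apply sorted_eq_buckets
    intro e he
    rw [hbund] at he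
    obtain ⟨p, hp, rfl⟩ := List.mem_map.mp he
    exact firstKey_bounds p.2
  rw [hb]
  rw [List.map_flatMap]
  rw [List.reverse_flatMap]
  refine congrArg List.flatten ?_
  apply List.flatMap_congr
  intro d hd
  have hd' : 0 ≤ d ∧ d < 10 := by
    have := (PySem.List.mem_pyRange_one).mp (List.mem_reverse.mp hd)
    omega
  have hg : PySem.List.pyGetD ((List.range 10).map (fun (dd : Nat) => numbers.filter (fun n => firstKey n == (dd:Int)))) d []
      = numbers.filter (fun n => firstKey n == d) := by
    rw [PySem.List.pyGetD_eq_getElem _ _ hd'.1 (by simp; omega)]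
    simp only [List.getElem_map, List.getElem_range]
    rw [Int.toNat_of_nonneg hd'.1]
  rw [hg]
  simp only [Function.comp]
  rw [hbund, bucket_chars numbers d, List.map_reverse]

-- ===== VERDICT (by name: the statement is the Claim_ definition above) =====
theorem solution_spec : Claim_equal_solution := by
  intro numbers _ _
  exact solution_eq_alt numbers
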